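-- pv_equiv track=rewrite | github.com/bakingeol/programmers | LV0_옹알이.py | solution
-- ===== SOURCE A (Python) =====
-- def solution(babbling):
--     x = ["aya", "ye", "woo", "ma"]
--     a,b,c,d = [],[],[],[]
--
--     for i in x:
--         a.append(i)
--     for i in x:
--         for j in x:
--             if i!=j:
--                 b.append(i+j)
--     for i in x:
--         for j in x:
--             for k in x:
--                 if i != j and i != k and j != k:
--                     c.append(i+j+k)
--     for i in x:
--         for j in x:
--             for k in x:
--                 for v in x:
--                     if i != j and i != k and i !=v and j != k and j != v and k != v:
--                         d.append(i+j+k+v)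
--     bab= a+b+c+d
--
--     count = 0
--     for i in babbling:
--         if i in bab:
--             count +=1
--
--     return count
-- ===== SOURCE B (Python) =====
-- def solution(babbling):
--     tokens = ["aya", "ye", "woo", "ma"]
--     count = 0
--     for word in babbling:
--         rest = word
--         used = set()
--         n = 0
--         progressed = True
--         while progressed:
--             progressed = False
--             for t in tokens:
--                 if t not in used and rest.startswith(t):
--                     used.add(t)
--                     rest = rest[len(t):]
--                     n += 1
--                     progressed = True
--                     break
--         if rest == "" and n >= 1:
--             count += 1
--     return count
-- ===== Notes on version B (the rewrite author's own statement) =====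
-- stated objective: simpler
-- what changed: A precomputes all 64 concatenations of 1-4 distinct tokens with four nested permutation loops and tests list membership per word; B drops the precomputed list entirely and greedily parses each word with a cursor and a used-token set (sound because no token is a prefix of another).
import Mathlib
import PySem

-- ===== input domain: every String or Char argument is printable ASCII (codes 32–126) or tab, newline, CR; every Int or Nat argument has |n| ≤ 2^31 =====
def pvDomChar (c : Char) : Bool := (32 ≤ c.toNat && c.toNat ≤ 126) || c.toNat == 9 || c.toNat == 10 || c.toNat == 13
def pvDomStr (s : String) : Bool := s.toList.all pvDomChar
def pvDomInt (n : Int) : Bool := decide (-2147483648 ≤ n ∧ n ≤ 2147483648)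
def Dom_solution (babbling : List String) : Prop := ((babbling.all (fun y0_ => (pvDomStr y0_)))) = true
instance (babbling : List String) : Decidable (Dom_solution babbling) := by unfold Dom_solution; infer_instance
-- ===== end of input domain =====

-- B replaces A's precomputed list of all 64 token permutations by a greedy per-word parse
-- (no token is a prefix of another, so greedy consumption is exact); objective: simpler.

-- ===== PORT A =====
-- literal transliteration of A: the four append loops become foldls over the same x,
-- bab = a ++ b ++ c ++ d, then the counting loop (Python `i in bab` = list membership).
def solution (babbling : List String) : Int :=
  let x : List String := ["aya", "ye", "woo", "ma"]
  let a := x.foldl (fun acc i => acc ++ [i]) []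
  let b := x.foldl (fun acc i =>
            x.foldl (fun acc j => if i ≠ j then acc ++ [i ++ j] else acc) acc) []
  let c := x.foldl (fun acc i => x.foldl (fun acc j => x.foldl (fun acc k =>
            if i ≠ j ∧ i ≠ k ∧ j ≠ k then acc ++ [i ++ j ++ k] else acc) acc) acc) []
  let d := x.foldl (fun acc i => x.foldl (fun acc j => x.foldl (fun acc k => x.foldl (fun acc v =>
            if i ≠ j ∧ i ≠ k ∧ i ≠ v ∧ j ≠ k ∧ j ≠ v ∧ k ≠ v then acc ++ [i ++ j ++ k ++ v] else acc)
            acc) acc) acc) []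
  let bab := a ++ b ++ c ++ d
  babbling.foldl (fun count i => if i ∈ bab then count + 1 else count) (0 : Int)

-- ===== PORT B =====
-- tokens as char lists; Python str.startswith → List.isPrefixOf, rest[len(t):] → List.drop (exact on all inputs)
def bTokA : List Char := ['a', 'y', 'a']
def bTokY : List Char := ['y', 'e']
def bTokW : List Char := ['w', 'o', 'o']
def bTokM : List Char := ['m', 'a']

-- B's while-loop: one fuel step per iteration (fuel = len(word)+1 suffices: each iteration
-- consumes ≥ 2 chars); ua/uy/uw/um are the `used` flags, n the number of consumed tokens.
def babLoop : Nat → List Char → Bool → Bool → Bool → Bool → Nat → Bool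
  | 0, _, _, _, _, _, _ => false
  | fuel+1, rest, ua, uy, uw, um, n =>
    if !ua && bTokA.isPrefixOf rest then babLoop fuel (rest.drop 3) true uy uw um (n+1)
    else if !uy && bTokY.isPrefixOf rest then babLoop fuel (rest.drop 2) ua true uw um (n+1)
    else if !uw && bTokW.isPrefixOf rest then babLoop fuel (rest.drop 3) ua uy true um (n+1)
    else if !um && bTokM.isPrefixOf rest then babLoop fuel (rest.drop 2) ua uy uw true (n+1)
    else rest.isEmpty && decide (1 ≤ n)

def solution_alt (babbling : List String) : Int :=
  babbling.foldl (fun count w =>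
    if babLoop (w.toList.length + 1) w.toList false false false false 0 then count + 1 else count)
    (0 : Int)

-- ===== PRECONDITION & SPEC =====
def Spec_solution (babbling : List String) (out : Int) : Prop := out = solution_alt babbling
instance (babbling : List String) (out : Int) : Decidable (Spec_solution babbling out) := by unfold Spec_solution; infer_instance

-- ===== CLAIM (what is proved, stated in full; the proofs are below) =====
def Claim_equal_solution : Prop := ∀ (babbling : List String), Dom_solution babbling → Spec_solution babbling (solution babbling)

-- ===== LEMMAS AND PROOFS =====

-- A's bab list, as a standalone closed term (definitionally the list built inside `solution`)
def pvBab : List String :=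
  let x : List String := ["aya", "ye", "woo", "ma"]
  let a := x.foldl (fun acc i => acc ++ [i]) []
  let b := x.foldl (fun acc i =>
            x.foldl (fun acc j => if i ≠ j then acc ++ [i ++ j] else acc) acc) []
  let c := x.foldl (fun acc i => x.foldl (fun acc j => x.foldl (fun acc k =>
            if i ≠ j ∧ i ≠ k ∧ j ≠ k then acc ++ [i ++ j ++ k] else acc) acc) acc) []
  let d := x.foldl (fun acc i => x.foldl (fun acc j => x.foldl (fun acc k => x.foldl (fun acc v =>
            if i ≠ j ∧ i ≠ k ∧ i ≠ v ∧ j ≠ k ∧ j ≠ v ∧ k ≠ v then acc ++ [i ++ j ++ k ++ v] else acc)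
            acc) acc) acc) []
  a ++ b ++ c ++ d

theorem solution_eq_pvBab (babbling : List String) :
    solution babbling
      = babbling.foldl (fun count i => if i ∈ pvBab then count + 1 else count) (0 : Int) := rfl

-- all concatenations of distinct still-unused tokens (possibly none), with fuel ≥ #unused flags
def pvC : Nat → Bool → Bool → Bool → Bool → List (List Char)
  | 0, _, _, _, _ => [[]]
  | k+1, ua, uy, uw, um =>
    [[]] ++ (if ua then [] else (pvC k true uy uw um).map (bTokA ++ ·))
         ++ (if uy then [] else (pvC k ua true uw um).map (bTokY ++ ·))
         ++ (if uw then [] else (pvC k ua uy true um).map (bTokW ++ ·))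
         ++ (if um then [] else (pvC k ua uy uw true).map (bTokM ++ ·))

def pvCnt (ua uy uw um : Bool) : Nat :=
  (cond ua 0 1) + (cond uy 0 1) + (cond uw 0 1) + (cond um 0 1)

theorem mem_pvC_succ (k : Nat) (ua uy uw um : Bool) (s : List Char) :
    s ∈ pvC (k+1) ua uy uw um ↔
      s = [] ∨ (ua = false ∧ ∃ t ∈ pvC k true uy uw um, bTokA ++ t = s)
             ∨ (uy = false ∧ ∃ t ∈ pvC k ua true uw um, bTokY ++ t = s)
             ∨ (uw = false ∧ ∃ t ∈ pvC k ua uy true um, bTokW ++ t = s)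
             ∨ (um = false ∧ ∃ t ∈ pvC k ua uy uw true, bTokM ++ t = s) := by
  cases ua <;> cases uy <;> cases uw <;> cases um <;>
    simp [pvC, List.mem_append, List.mem_map]

theorem babLoop_eq : ∀ (fuel : Nat) (rest : List Char) (ua uy uw um : Bool) (n : Nat),
    rest.length < fuel →
    babLoop fuel rest ua uy uw um n =
      (decide (rest ∈ pvC (pvCnt ua uy uw um) ua uy uw um) && (decide (1 ≤ n) || !rest.isEmpty)) := by
  intro fuel
  induction fuel with
  | zero => intro rest _ _ _ _ _ h; exact absurd h (Nat.not_lt_zero _)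
  | succ f ih =>
    intro rest ua uy uw um n h
    simp only [babLoop]
    by_cases hA : (!ua && bTokA.isPrefixOf rest) = true
    · rw [if_pos hA]
      have hABA : ua = false ∧ bTokA.isPrefixOf rest = true := by simpa using hA
      have hv : ua = false := hABA.1
      have hpre : bTokA <+: rest := List.isPrefixOf_iff_prefix.mp hABA.2
      obtain ⟨t, rfl⟩ := hpre
      have hdrop : (bTokA ++ t).drop 3 = t := by
        simpa [bTokA] using (List.drop_left (l₁ := bTokA) (l₂ := t))
      have hlen : t.length < f := by simp [bTokA] at h; omega
      rw [hdrop, ih t true uy uw um (n+1) hlen]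
      subst hv
      have hc : pvCnt false uy uw um = pvCnt true uy uw um + 1 := by
        cases uy <;> cases uw <;> cases um <;> simp [pvCnt]
      rw [hc]
      have hiff : (bTokA ++ t ∈ pvC (pvCnt true uy uw um + 1) false uy uw um) ↔ (t ∈ pvC (pvCnt true uy uw um) true uy uw um) := by
        constructor
        · intro hmem
          rcases (mem_pvC_succ _ false uy uw um _).mp hmem with
            hnil | ⟨_, t', ht', heq⟩ | ⟨_, t', ht', heq⟩ | ⟨_, t', ht', heq⟩ | ⟨_, t', ht', heq⟩
          · simp [bTokA] at hnil
          · rwa [← List.append_cancel_left heq]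
          · simp [bTokY, bTokA] at heq
          · simp [bTokW, bTokA] at heq
          · simp [bTokM, bTokA] at heq
        · intro hmem
          exact (mem_pvC_succ _ false uy uw um _).mpr ((Or.inr (Or.inl ⟨rfl, t, hmem, rfl⟩)))
      have hE : (bTokA ++ t).isEmpty = false := by simp [bTokA]
      have h1 : decide (1 ≤ n + 1) = true := by simp
      rw [hE, h1, decide_eq_decide.mpr hiff]
      · simp
      · infer_instance
    · rw [if_neg hA]
      by_cases hY : (!uy && bTokY.isPrefixOf rest) = true
      · rw [if_pos hY]
        have hABY : uy = false ∧ bTokY.isPrefixOf rest = true := by simpa using hY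
        have hv : uy = false := hABY.1
        have hpre : bTokY <+: rest := List.isPrefixOf_iff_prefix.mp hABY.2
        obtain ⟨t, rfl⟩ := hpre
        have hdrop : (bTokY ++ t).drop 2 = t := by
          simpa [bTokY] using (List.drop_left (l₁ := bTokY) (l₂ := t))
        have hlen : t.length < f := by simp [bTokY] at h; omega
        rw [hdrop, ih t ua true uw um (n+1) hlen]
        subst hv
        have hc : pvCnt ua false uw um = pvCnt ua true uw um + 1 := by
          cases ua <;> cases uw <;> cases um <;> simp [pvCnt]
        rw [hc]
        have hiff : (bTokY ++ t ∈ pvC (pvCnt ua true uw um + 1) ua false uw um) ↔ (t ∈ pvC (pvCnt ua true uw um) ua true uw um) := by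
          constructor
          · intro hmem
            rcases (mem_pvC_succ _ ua false uw um _).mp hmem with
              hnil | ⟨_, t', ht', heq⟩ | ⟨_, t', ht', heq⟩ | ⟨_, t', ht', heq⟩ | ⟨_, t', ht', heq⟩
            · simp [bTokY] at hnil
            · simp [bTokA, bTokY] at heq
            · rwa [← List.append_cancel_left heq]
            · simp [bTokW, bTokY] at heq
            · simp [bTokM, bTokY] at heq
          · intro hmem
            exact (mem_pvC_succ _ ua false uw um _).mpr ((Or.inr (Or.inr (Or.inl ⟨rfl, t, hmem, rfl⟩))))
        have hE : (bTokY ++ t).isEmpty = false := by simp [bTokY]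
        have h1 : decide (1 ≤ n + 1) = true := by simp
        rw [hE, h1, decide_eq_decide.mpr hiff]
        · simp
        · infer_instance
      · rw [if_neg hY]
        by_cases hW : (!uw && bTokW.isPrefixOf rest) = true
        · rw [if_pos hW]
          have hABW : uw = false ∧ bTokW.isPrefixOf rest = true := by simpa using hW
          have hv : uw = false := hABW.1
          have hpre : bTokW <+: rest := List.isPrefixOf_iff_prefix.mp hABW.2
          obtain ⟨t, rfl⟩ := hpre
          have hdrop : (bTokW ++ t).drop 3 = t := by
            simpa [bTokW] using (List.drop_left (l₁ := bTokW) (l₂ := t))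
          have hlen : t.length < f := by simp [bTokW] at h; omega
          rw [hdrop, ih t ua uy true um (n+1) hlen]
          subst hv
          have hc : pvCnt ua uy false um = pvCnt ua uy true um + 1 := by
            cases ua <;> cases uy <;> cases um <;> simp [pvCnt]
          rw [hc]
          have hiff : (bTokW ++ t ∈ pvC (pvCnt ua uy true um + 1) ua uy false um) ↔ (t ∈ pvC (pvCnt ua uy true um) ua uy true um) := by
            constructor
            · intro hmem
              rcases (mem_pvC_succ _ ua uy false um _).mp hmem with
                hnil | ⟨_, t', ht', heq⟩ | ⟨_, t', ht', heq⟩ | ⟨_, t', ht', heq⟩ | ⟨_, t', ht', heq⟩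
              · simp [bTokW] at hnil
              · simp [bTokA, bTokW] at heq
              · simp [bTokY, bTokW] at heq
              · rwa [← List.append_cancel_left heq]
              · simp [bTokM, bTokW] at heq
            · intro hmem
              exact (mem_pvC_succ _ ua uy false um _).mpr ((Or.inr (Or.inr (Or.inr (Or.inl ⟨rfl, t, hmem, rfl⟩)))))
          have hE : (bTokW ++ t).isEmpty = false := by simp [bTokW]
          have h1 : decide (1 ≤ n + 1) = true := by simp
          rw [hE, h1, decide_eq_decide.mpr hiff]
          · simp
          · infer_instance
        · rw [if_neg hW]
          by_cases hM : (!um && bTokM.isPrefixOf rest) = true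
          · rw [if_pos hM]
            have hABM : um = false ∧ bTokM.isPrefixOf rest = true := by simpa using hM
            have hv : um = false := hABM.1
            have hpre : bTokM <+: rest := List.isPrefixOf_iff_prefix.mp hABM.2
            obtain ⟨t, rfl⟩ := hpre
            have hdrop : (bTokM ++ t).drop 2 = t := by
              simpa [bTokM] using (List.drop_left (l₁ := bTokM) (l₂ := t))
            have hlen : t.length < f := by simp [bTokM] at h; omega
            rw [hdrop, ih t ua uy uw true (n+1) hlen]
            subst hv
            have hc : pvCnt ua uy uw false = pvCnt ua uy uw true + 1 := by
              cases ua <;> cases uy <;> cases uw <;> simp [pvCnt]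
            rw [hc]
            have hiff : (bTokM ++ t ∈ pvC (pvCnt ua uy uw true + 1) ua uy uw false) ↔ (t ∈ pvC (pvCnt ua uy uw true) ua uy uw true) := by
              constructor
              · intro hmem
                rcases (mem_pvC_succ _ ua uy uw false _).mp hmem with
                  hnil | ⟨_, t', ht', heq⟩ | ⟨_, t', ht', heq⟩ | ⟨_, t', ht', heq⟩ | ⟨_, t', ht', heq⟩
                · simp [bTokM] at hnil
                · simp [bTokA, bTokM] at heq
                · simp [bTokY, bTokM] at heq
                · simp [bTokW, bTokM] at heq
                · rwa [← List.append_cancel_left heq]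
              · intro hmem
                exact (mem_pvC_succ _ ua uy uw false _).mpr ((Or.inr (Or.inr (Or.inr (Or.inr ⟨rfl, t, hmem, rfl⟩)))))
            have hE : (bTokM ++ t).isEmpty = false := by simp [bTokM]
            have h1 : decide (1 ≤ n + 1) = true := by simp
            rw [hE, h1, decide_eq_decide.mpr hiff]
            · simp
            · infer_instance
          · rw [if_neg hM]
            cases rest with
            | nil =>
              have hmem : ([] : List Char) ∈ pvC (pvCnt ua uy uw um) ua uy uw um := by
                cases hk : pvCnt ua uy uw um with
                | zero => simp [pvC]
                | succ k => exact (mem_pvC_succ k ua uy uw um _).mpr (Or.inl rfl)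
              simp [hmem]
            | cons ch tl =>
              have hnot : (ch :: tl) ∉ pvC (pvCnt ua uy uw um) ua uy uw um := by
                cases hk : pvCnt ua uy uw um with
                | zero => simp [pvC]
                | succ k =>
                  intro hmem
                  rcases (mem_pvC_succ k ua uy uw um _).mp hmem with
                    hnil | ⟨hf, t', ht', heq⟩ | ⟨hf, t', ht', heq⟩ | ⟨hf, t', ht', heq⟩ | ⟨hf, t', ht', heq⟩
                  · simp at hnil
                  · exact hA (by simp [hf, List.isPrefixOf_iff_prefix]; exact ⟨t', heq⟩)
                  · exact hY (by simp [hf, List.isPrefixOf_iff_prefix]; exact ⟨t', heq⟩)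
                  · exact hW (by simp [hf, List.isPrefixOf_iff_prefix]; exact ⟨t', heq⟩)
                  · exact hM (by simp [hf, List.isPrefixOf_iff_prefix]; exact ⟨t', heq⟩)
              simp [hnot]

-- the 65 strings of pvC 4 with all tokens available are exactly [] plus A's bab list
set_option maxRecDepth 100000 in
set_option maxHeartbeats 1000000 in
theorem pvC_perm : ([] :: pvBab.map String.toList).Perm (pvC 4 false false false false) := by
  decide

set_option maxRecDepth 100000 in
set_option maxHeartbeats 1000000 in
theorem nil_not_mem_bab : ([] : List Char) ∉ pvBab.map String.toList := by decide

theorem perWord (w : String) :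
    (decide (w ∈ pvBab) : Bool)
      = babLoop (w.toList.length + 1) w.toList false false false false 0 := by
  rw [babLoop_eq _ _ _ _ _ _ _ (Nat.lt_succ_self _)]
  have h4 : pvCnt false false false false = 4 := rfl
  rw [h4]
  have hmem : w ∈ pvBab ↔ w.toList ∈ pvBab.map String.toList := by
    simp [List.mem_map, String.toList_inj]
  have hC : w.toList ∈ pvC 4 false false false false
      ↔ (w.toList = [] ∨ w.toList ∈ pvBab.map String.toList) := by
    rw [← pvC_perm.mem_iff]; simp
  by_cases hw : w.toList = []
  · simp [hw, hmem, nil_not_mem_bab]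
  · have hne : w.toList.isEmpty = false := by simpa [List.isEmpty_iff] using hw
    simp only [hne, Bool.not_false, Bool.or_true, Bool.and_true]
    simp [hmem, hC, hw]

-- ===== VERDICT (by name: the statement is the Claim_ definition above) =====
theorem solution_spec : Claim_equal_solution := by
  intro babbling _
  unfold Spec_solution
  rw [solution_eq_pvBab]
  unfold solution_alt
  have hf : (fun (count : Int) (i : String) => if i ∈ pvBab then count + 1 else count)
      = (fun (count : Int) (w : String) =>
          if babLoop (w.toList.length + 1) w.toList false false false false 0
          then count + 1 else count) := by
    funext count w
    rw [← perWord w]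
    by_cases hw : w ∈ pvBab <;> simp [hw]
  rw [hf]
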